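-- pv_equiv track=rewrite | github.com/rf-iasys/OEIS | OEIS_A136412.py | A136412
-- ===== SOURCE A (Python) =====
-- def A136412(n):
--     marked = []
--     current = 1
--     k = 1
--
--     while len(marked) < n:
--         k += current//2 + k
--         current += current + 2*k
--         marked.append(k)
--
--     return marked
-- ===== SOURCE B (Python) =====
-- def A136412(n):
--     terms = []
--     p = 1  # p == 4**len(terms)
--     for _ in range(n):
--         terms.append(2 + 5 * (p - 1) // 3)
--         p *= 4
--     return terms
-- ===== Notes on version B (the rewrite author's own statement) =====
-- stated objective: simpler
-- what changed: Replaced the stateful current/k recurrence (with its floor division current//2) by the closed form term = 2 + 5*(4**i - 1)//3, generated with a single running power p = 4**i.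
import Mathlib
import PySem

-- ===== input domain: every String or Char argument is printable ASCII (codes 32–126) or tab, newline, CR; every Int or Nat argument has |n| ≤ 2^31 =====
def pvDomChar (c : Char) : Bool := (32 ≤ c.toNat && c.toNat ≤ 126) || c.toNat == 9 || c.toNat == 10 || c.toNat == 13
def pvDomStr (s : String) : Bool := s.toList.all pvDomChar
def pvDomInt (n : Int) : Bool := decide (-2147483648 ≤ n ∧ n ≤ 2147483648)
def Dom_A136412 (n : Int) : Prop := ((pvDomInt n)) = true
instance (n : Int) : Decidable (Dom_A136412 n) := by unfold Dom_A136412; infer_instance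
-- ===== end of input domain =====

-- B replaces A's stateful current/k recurrence with a closed-form per-index term 2 + 5*(4^i-1)//3 (objective: simpler).


-- ===== PORT A =====
-- the while loop appends exactly one element per iteration, so it runs exactly
-- (n - len(marked)).toNat = n.toNat times from the empty list; that count is the fuel
def A136412loop : Nat → Int → Int → List Int → List Int
  | 0, _, _, marked => marked
  | m + 1, current, k, marked =>
      let k' := k + (PySem.Int.floordiv current 2 + k)
      let current' := current + (current + 2 * k')
      A136412loop m current' k' (marked ++ [k'])

def A136412 (n : Int) : List Int := A136412loop n.toNat 1 1 []

-- ===== PORT B =====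
-- the for loop runs range(n) times: fuel n.toNat; state is the running power p = 4**len(terms)
def A136412altLoop : Nat → Int → List Int → List Int
  | 0, _, terms => terms
  | m + 1, p, terms =>
      A136412altLoop m (p * 4) (terms ++ [2 + PySem.Int.floordiv (5 * (p - 1)) 3])

def A136412_alt (n : Int) : List Int := A136412altLoop n.toNat 1 []

-- ===== PRECONDITION & SPEC =====
def Spec_A136412 (n : Int) (out : List Int) : Prop := out = A136412_alt n
instance (n : Int) (out : List Int) : Decidable (Spec_A136412 n out) := by unfold Spec_A136412; infer_instance

-- ===== CLAIM (what is proved, stated in full; the proofs are below) =====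
def Claim_equal_A136412 : Prop := ∀ (n : Int), Dom_A136412 n → Spec_A136412 n (A136412 n)

-- ===== LEMMAS AND PROOFS =====

-- the (current, k) state after j iterations of A's loop
def pvState : Nat → Int × Int
  | 0 => (1, 1)
  | j + 1 =>
      let c := (pvState j).1
      let k := (pvState j).2
      let k' := k + (PySem.Int.floordiv c 2 + k)
      (c + (c + 2 * k'), k')

lemma pvLoop_eq_state : ∀ (m j : Nat) (acc : List Int),
    A136412loop m (pvState j).1 (pvState j).2 acc
      = acc ++ (List.range m).map (fun i => (pvState (j + i + 1)).2) := by
  intro m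
  induction m with
  | zero => intro j acc; simp [A136412loop]
  | succ m ih =>
    intro j acc
    show A136412loop m (pvState (j + 1)).1 (pvState (j + 1)).2 (acc ++ [(pvState (j + 1)).2]) = _
    rw [ih (j + 1)]
    rw [List.range_succ_eq_map]
    simp [Nat.add_assoc, Nat.add_comm, Nat.add_left_comm, Function.comp]

-- closed form of the state: 3*c_{i+1} + 2 = 5*4^(i+1) and 3*k_{i+1} = 5*4^i + 1
lemma pvState_closed : ∀ i : Nat,
    3 * (pvState (i + 1)).1 + 2 = 5 * 4 ^ (i + 1) ∧ 3 * (pvState (i + 1)).2 = 5 * 4 ^ i + 1 := by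
  intro i
  induction i with
  | zero => constructor <;> decide
  | succ i ih =>
    obtain ⟨hc, hk⟩ := ih
    set c := (pvState (i + 1)).1 with hcdef
    set k := (pvState (i + 1)).2 with hkdef
    have hfd : PySem.Int.floordiv c 2 = c / 2 := PySem.Int.floordiv_eq_ediv_of_pos (by omega)
    have h4 : (0:Int) < 4 ^ (i + 1) := by positivity
    show 3 * (c + (c + 2 * (k + (PySem.Int.floordiv c 2 + k)))) + 2 = 5 * 4 ^ (i + 1 + 1) ∧
         3 * (k + (PySem.Int.floordiv c 2 + k)) = 5 * 4 ^ (i + 1) + 1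
    rw [hfd]
    have hx1 : (4:Int) ^ (i + 1) = 4 * 4 ^ i := by ring
    have hx2 : (4:Int) ^ (i + 1 + 1) = 16 * 4 ^ i := by ring
    rw [hx1] at hc
    rw [hx1, hx2]
    constructor <;> omega

lemma pvTerm_eq : ∀ i : Nat,
    (pvState (i + 1)).2 = 2 + PySem.Int.floordiv (5 * (4 ^ i - 1)) 3 := by
  intro i
  have hk := (pvState_closed i).2
  have hfd : PySem.Int.floordiv (5 * (4 ^ i - 1)) 3 = (5 * ((4:Int) ^ i - 1)) / 3 :=
    PySem.Int.floordiv_eq_ediv_of_pos (by omega)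
  rw [hfd]
  omega

lemma pvAltLoop_eq : ∀ (m j : Nat) (acc : List Int),
    A136412altLoop m (4 ^ j) acc
      = acc ++ (List.range m).map (fun i => 2 + PySem.Int.floordiv (5 * (4 ^ (j + i) - 1)) 3) := by
  intro m
  induction m with
  | zero => intro j acc; simp [A136412altLoop]
  | succ m ih =>
    intro j acc
    show A136412altLoop m (4 ^ j * 4) (acc ++ [2 + PySem.Int.floordiv (5 * (4 ^ j - 1)) 3]) = _
    rw [show (4:Int) ^ j * 4 = 4 ^ (j + 1) by ring, ih (j + 1)]
    rw [List.range_succ_eq_map]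
    simp [Nat.add_comm, Nat.add_left_comm, Function.comp]

-- ===== VERDICT (by name: the statement is the Claim_ definition above) =====
theorem A136412_spec : Claim_equal_A136412 := by
  intro n _
  unfold Spec_A136412 A136412 A136412_alt
  show A136412loop n.toNat (pvState 0).1 (pvState 0).2 [] = A136412altLoop n.toNat ((4:Int) ^ 0) []
  rw [pvLoop_eq_state, pvAltLoop_eq]
  apply congrArg
  apply List.map_congr_left
  intro k _
  simp only [Nat.zero_add]
  exact pvTerm_eq k
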